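-- pv_equiv track=rewrite | github.com/MrBrantCode/unitest_baseline | mut_generate/mist_train_cf/cf_34851/solution.py | rearrangeLadybugs
-- ===== SOURCE A (Python) =====
-- from typing import List
--
-- def rearrangeLadybugs(ladybugs: List[int]) -> List[int]:
--     ladybugs = ladybugs[:]  # Create a copy of the input array to avoid modifying it
--     for ladybugIndex in range(len(ladybugs)):
--         if ladybugs[ladybugIndex] == 1:
--             continue
--
--         leftFound = False
--         for i in range(ladybugIndex - 1, -1, -1):
--             if ladybugs[i] == 0:
--                 ladybugs[i], ladybugs[ladybugIndex] = ladybugs[ladybugIndex], ladybugs[i]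
--                 leftFound = True
--                 break
--
--         if not leftFound:
--             for j in range(ladybugIndex + 1, len(ladybugs)):
--                 if ladybugs[j] == 0:
--                     ladybugs[j], ladybugs[ladybugIndex] = ladybugs[ladybugIndex], ladybugs[j]
--                     break
--
--     return ladybugs
-- ===== SOURCE B (Python) =====
-- def rearrangeLadybugs(ladybugs):
--     n = len(ladybugs)
--     res = ladybugs[:]
--     leftz = []  # stack: zero positions < i, top = largest (nearest to i)
--     rightz = [j for j in range(n - 1, -1, -1) if ladybugs[j] == 0]  # stack: top = smallest
--     for i in range(n):
--         if rightz and rightz[-1] == i: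
--             # res[i] is a still-unconsumed zero: it becomes a left zero; nothing moves
--             leftz.append(rightz.pop())
--             continue
--         v = res[i]
--         if v == 1:
--             continue
--         if leftz:
--             p = leftz.pop()
--         elif rightz:
--             p = rightz.pop()
--         else:
--             continue
--         res[p] = v
--         res[i] = 0
--         leftz.append(i)
--     return res
-- ===== Notes on version B (the rewrite author's own statement) =====
-- stated objective: faster
-- what changed: Replaces A's per-element linear scans for the nearest zero with two stacks of zero positions (nearest-left zero = top of a left stack, first-right zero = top of a descending right stack), maintained in O(1) per step, so the whole pass is linear.
import Mathlib
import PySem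

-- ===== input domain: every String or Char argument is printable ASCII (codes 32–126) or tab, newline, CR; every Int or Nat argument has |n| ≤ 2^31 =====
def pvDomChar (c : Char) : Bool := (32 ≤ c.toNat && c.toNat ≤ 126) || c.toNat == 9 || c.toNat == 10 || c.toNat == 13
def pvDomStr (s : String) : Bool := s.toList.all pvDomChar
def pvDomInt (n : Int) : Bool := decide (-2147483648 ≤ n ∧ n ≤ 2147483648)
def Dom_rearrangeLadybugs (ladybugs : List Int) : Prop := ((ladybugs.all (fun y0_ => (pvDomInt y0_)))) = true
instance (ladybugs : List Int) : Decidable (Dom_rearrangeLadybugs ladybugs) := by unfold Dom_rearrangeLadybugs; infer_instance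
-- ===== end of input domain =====

-- B replaces A's per-element linear scans for the nearest zero by two stacks of zero
-- positions maintained in O(1) per step (objective: faster).
-- Every Python index here comes from `range` and is in bounds, so indexing is ported with getD.

-- ===== PORT A =====

-- inner loop `for i in range(ladybugIndex-1, -1, -1): if ladybugs[i]==0: … break`
def findLeftZero (bs : List Int) (i : Nat) : Option Nat :=
  match i with
  | 0 => none
  | k + 1 => if bs.getD k 0 = 0 then some k else findLeftZero bs k

-- inner loop `for j in range(ladybugIndex+1, len(ladybugs)): if ladybugs[j]==0: … break`
def findRightZero (bs : List Int) (j n : Nat) : Option Nat :=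
  if _h : j < n then
    (if bs.getD j 0 = 0 then some j else findRightZero bs (j + 1) n)
  else none
termination_by n - j

-- one iteration of A's outer loop (the swap writes the two old values, as Python does)
def stepA (bs : List Int) (i : Nat) : List Int :=
  if bs.getD i 0 = 1 then bs
  else
    match findLeftZero bs i with
    | some p => (bs.set p (bs.getD i 0)).set i (bs.getD p 0)
    | none =>
      match findRightZero bs (i + 1) bs.length with
      | some p => (bs.set p (bs.getD i 0)).set i (bs.getD p 0)
      | none => bs

def rearrangeLadybugs (ladybugs : List Int) : List Int :=
  (List.range ladybugs.length).foldl stepA ladybugs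

-- ===== PORT B =====

-- state = (res, leftz, rightz); both Python stacks are Lean lists with head = stack top
def stepB (st : List Int × List Nat × List Nat) (i : Nat) : List Int × List Nat × List Nat :=
  match st with
  | (res, lz, rz) =>
    if rz.head? = some i then (res, i :: lz, rz.tail)
    else
      let v := res.getD i 0
      if v = 1 then (res, lz, rz)
      else
        match lz with
        | p :: lz' => ((res.set p v).set i 0, i :: lz', rz)
        | [] =>
          match rz with
          | p :: rz' => ((res.set p v).set i 0, [i], rz')
          | [] => (res, lz, rz)

def rearrangeLadybugs_alt (ladybugs : List Int) : List Int :=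
  let n := ladybugs.length
  -- `[j for j in range(n-1,-1,-1) if ladybugs[j]==0]`; its top (= Python end) is the head here
  let rightz := (List.range n).filter (fun j => ladybugs.getD j 0 = 0)
  ((List.range n).foldl stepB (ladybugs, [], rightz)).1

-- ===== PRECONDITION & SPEC =====
def Spec_rearrangeLadybugs (ladybugs : List Int) (out : List Int) : Prop := out = rearrangeLadybugs_alt ladybugs
instance (ladybugs : List Int) (out : List Int) : Decidable (Spec_rearrangeLadybugs ladybugs out) := by unfold Spec_rearrangeLadybugs; infer_instance

-- ===== CLAIM (what is proved, stated in full; the proofs are below) =====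
def Claim_equal_rearrangeLadybugs : Prop := ∀ (ladybugs : List Int), Dom_rearrangeLadybugs ladybugs → Spec_rearrangeLadybugs ladybugs (rearrangeLadybugs ladybugs)

-- ===== LEMMAS AND PROOFS =====

-- the zero positions strictly below i, as B's left stack (descending, head = largest)
def Lz (bs : List Int) (i : Nat) : List Nat :=
  ((List.range i).filter (fun j => bs.getD j 0 = 0)).reverse

-- the zero positions in [j, n), ascending (head = smallest), as B's right stack
def Rz (bs : List Int) (j n : Nat) : List Nat :=
  (List.range' j (n - j)).filter (fun j => bs.getD j 0 = 0)

theorem getD_set (l : List Int) (p j : Nat) (v : Int) (hp : p < l.length) :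
    (l.set p v).getD j 0 = if j = p then v else l.getD j 0 := by
  simp only [List.getD_eq_getElem?_getD, List.getElem?_set]
  by_cases h : j = p
  · subst h; simp [hp]
  · have h' : ¬ (p = j) := fun e => h e.symm
    simp [h, h']

theorem set_getD_self (l : List Int) (n : Nat) : l.set n (l.getD n 0) = l := by
  induction l generalizing n with
  | nil => simp
  | cons a t ih =>
    cases n with
    | zero => simp
    | succ m =>
      simp only [List.set]
      rw [show (a :: t).getD (m+1) 0 = t.getD m 0 by simp [List.getD_eq_getElem?_getD], ih]

theorem head?_some_mem {α : Type} {l : List α} {a : α} (h : l.head? = some a) : a ∈ l := by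
  cases l <;> simp_all

theorem findLeftZero_eq (bs : List Int) (i : Nat) :
    findLeftZero bs i = (Lz bs i).head? := by
  induction i with
  | zero => simp [findLeftZero, Lz]
  | succ k ih =>
    rw [findLeftZero, Lz, List.range_succ, List.filter_append, List.reverse_append]
    by_cases h : bs.getD k 0 = 0
    · have h2 := h; rw [List.getD_eq_getElem?_getD] at h2
      rw [if_pos h]
      simp [List.filter_cons, h2]
    · have h2 := h; rw [List.getD_eq_getElem?_getD] at h2
      rw [if_neg h, ih, Lz]
      simp [List.filter_cons, h2]

theorem findRightZero_eq (bs : List Int) (j n : Nat) :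
    findRightZero bs j n = (Rz bs j n).head? := by
  by_cases h : j < n
  · rw [findRightZero, dif_pos h]
    have hr : n - j = (n - (j + 1)) + 1 := by omega
    rw [Rz, hr, List.range'_succ, List.filter_cons]
    by_cases hz : bs.getD j 0 = 0
    · have hz2 := hz; rw [List.getD_eq_getElem?_getD] at hz2
      rw [if_pos hz]
      simp [hz2]
    · have hz2 := hz; rw [List.getD_eq_getElem?_getD] at hz2
      rw [if_neg hz, findRightZero_eq bs (j+1) n, Rz]
      simp [hz2]
  · rw [findRightZero, dif_neg h]
    have h0 : n - j = 0 := by omega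
    rw [Rz, h0]
    simp
termination_by n - j

-- removing the unique marked occurrence of p from a filter when the predicate turns false at p
theorem filter_remove {l A B : List Nat} {p : Nat} {f g : Nat → Bool}
    (hnd : l.Nodup) (hfg : ∀ j ∈ l, j ≠ p → g j = f j) (hgp : g p = false)
    (h : l.filter f = A ++ p :: B) : l.filter g = A ++ B := by
  induction l generalizing A with
  | nil => exact absurd h (by simp)
  | cons x t ih =>
    have hnd' : t.Nodup := (List.nodup_cons.mp hnd).2
    have hfg' : ∀ j ∈ t, j ≠ p → g j = f j := fun j hj => hfg j (by simp [hj])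
    by_cases hxp : x = p
    · subst hxp
      have hpx : x ∉ t := (List.nodup_cons.mp hnd).1
      have hfx : f x = true := by
        by_contra hfx
        have hfx' : f x = false := by simpa using hfx
        have ht : t.filter f = A ++ x :: B := by simpa [List.filter_cons, hfx'] using h
        exact hpx (List.mem_filter.mp (by rw [ht]; simp)).1
      have hAB : x :: t.filter f = A ++ x :: B := by simpa [List.filter_cons, hfx] using h
      cases A with
      | nil =>
        have hB : t.filter f = B := by simpa using hAB
        have hgt : t.filter g = t.filter f :=
          List.filter_congr (fun j hj => hfg' j hj (fun e => hpx (e ▸ hj)))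
        simp [List.filter_cons, hgp, hgt, hB]
      | cons a A' =>
        exfalso
        have ha : x = a := by simpa using congrArg List.head? hAB
        subst ha
        have ht : t.filter f = A' ++ x :: B := by simpa using hAB
        exact hpx (List.mem_filter.mp (by rw [ht]; simp)).1
    · have hgx : g x = f x := hfg x (by simp) hxp
      by_cases hfx : f x = true
      · have hAB : x :: t.filter f = A ++ p :: B := by simpa [List.filter_cons, hfx] using h
        cases A with
        | nil =>
          exfalso
          have : x = p := by simpa using congrArg List.head? hAB
          exact hxp this
        | cons a A' =>
          have ha : x = a := by simpa using congrArg List.head? hAB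
          subst ha
          have ht : t.filter f = A' ++ p :: B := by simpa using hAB
          have := ih hnd' hfg' ht
          simp [List.filter_cons, hgx, hfx, this]
      · have hfx' : f x = false := by simpa using hfx
        have ht : t.filter f = A ++ p :: B := by simpa [List.filter_cons, hfx'] using h
        have := ih hnd' hfg' ht
        simp [List.filter_cons, hgx, hfx', this]

theorem mem_Lz {bs : List Int} {i p : Nat} (h : p ∈ Lz bs i) :
    p < i ∧ bs.getD p 0 = 0 := by
  rw [Lz, List.mem_reverse, List.mem_filter, List.mem_range] at h
  exact ⟨h.1, by simpa using h.2⟩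

theorem mem_Rz {bs : List Int} {j n p : Nat} (h : p ∈ Rz bs j n) :
    j ≤ p ∧ p < n ∧ bs.getD p 0 = 0 := by
  rw [Rz, List.mem_filter, List.mem_range'] at h
  obtain ⟨⟨t, ht, he⟩, hz⟩ := h
  exact ⟨by omega, by omega, by simpa using hz⟩

theorem Lz_succ_zero {bs : List Int} {i : Nat} (hz : bs.getD i 0 = 0) :
    Lz bs (i + 1) = i :: Lz bs i := by
  rw [List.getD_eq_getElem?_getD] at hz
  rw [Lz, Lz, List.range_succ, List.filter_append, List.reverse_append]
  simp [List.filter_cons, hz]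

theorem Lz_succ_nonzero {bs : List Int} {i : Nat} (hz : bs.getD i 0 ≠ 0) :
    Lz bs (i + 1) = Lz bs i := by
  rw [List.getD_eq_getElem?_getD] at hz
  rw [Lz, Lz, List.range_succ, List.filter_append, List.reverse_append]
  simp [List.filter_cons, hz]

theorem Rz_cons_zero {bs : List Int} {i n : Nat} (hi : i < n) (hz : bs.getD i 0 = 0) :
    Rz bs i n = i :: Rz bs (i + 1) n := by
  rw [List.getD_eq_getElem?_getD] at hz
  rw [Rz, Rz]
  have hr : n - i = (n - (i + 1)) + 1 := by omega
  rw [hr, List.range'_succ, List.filter_cons]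
  simp [hz]

theorem Rz_shift {bs : List Int} {i n : Nat} (hz : bs.getD i 0 ≠ 0) :
    Rz bs i n = Rz bs (i + 1) n := by
  by_cases hi : i < n
  · rw [List.getD_eq_getElem?_getD] at hz
    rw [Rz, Rz]
    have hr : n - i = (n - (i + 1)) + 1 := by omega
    rw [hr, List.range'_succ, List.filter_cons]
    simp [hz]
  · rw [Rz, Rz]
    have h1 : n - i = 0 := by omega
    have h2 : n - (i + 1) = 0 := by omega
    rw [h1, h2]
    simp

theorem stepA_length (bs : List Int) (i : Nat) : (stepA bs i).length = bs.length := by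
  rw [stepA]
  split_ifs with h
  · rfl
  · rcases hfl : findLeftZero bs i with _ | p
    · rcases hfr : findRightZero bs (i+1) bs.length with _ | q <;> simp
    · simp

-- the heart of the proof: one step of A and one step of B agree, and B's stacks
-- remain exactly the zero-position lists of the current array
theorem step_eq (res : List Int) (i n : Nat) (hlen : res.length = n) (hi : i < n) :
    stepB (res, Lz res i, Rz res i n) i
      = (stepA res i, Lz (stepA res i) (i + 1), Rz (stepA res i) (i + 1) n) := by
  by_cases hz : res.getD i 0 = 0
  · -- current value is 0: B transfers the right-stack top; A swaps zeros (no change)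
    have hrz : Rz res i n = i :: Rz res (i + 1) n := Rz_cons_zero hi hz
    have hA : stepA res i = res := by
      rw [stepA]
      have h1 : ¬ res.getD i 0 = 1 := by rw [hz]; decide
      rw [if_neg h1, findLeftZero_eq]
      rcases hLz : (Lz res i).head? with _ | p
      · rw [findRightZero_eq, hlen]
        rcases hRz : (Rz res (i+1) n).head? with _ | q
        · rfl
        · have hq := (mem_Rz (head?_some_mem hRz)).2.2
          show (res.set q (res.getD i 0)).set i (res.getD q 0) = res
          have e1 : res.set q (res.getD i 0) = res := by rw [hz, ← hq, set_getD_self]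
          have e2 : res.set i (res.getD q 0) = res := by rw [hq, ← hz, set_getD_self]
          rw [e1, e2]
      · have hp := (mem_Lz (head?_some_mem hLz)).2
        show (res.set p (res.getD i 0)).set i (res.getD p 0) = res
        have e1 : res.set p (res.getD i 0) = res := by rw [hz, ← hp, set_getD_self]
        have e2 : res.set i (res.getD p 0) = res := by rw [hp, ← hz, set_getD_self]
        rw [e1, e2]
    rw [hA, stepB, hrz, Lz_succ_zero hz]
    simp
  · -- current value nonzero: the right-stack top cannot be i
    have hne : ¬ (Rz res i n).head? = some i := by
      intro hh
      exact hz (mem_Rz (head?_some_mem hh)).2.2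
    have hshift : Rz res i n = Rz res (i + 1) n := Rz_shift hz
    have hzb : ¬ res[i]?.getD 0 = 0 := by rw [← List.getD_eq_getElem?_getD]; exact hz
    by_cases h1 : res.getD i 0 = 1
    · -- value 1: both skip
      have h1b : res[i]?.getD 0 = 1 := by rw [← List.getD_eq_getElem?_getD]; exact h1
      have hA : stepA res i = res := by rw [stepA, if_pos h1]
      rw [hA, stepB, if_neg hne, Lz_succ_nonzero hz, ← hshift]
      simp [h1b]
    · -- a ladybug to relocate
      have h1b : ¬ res[i]?.getD 0 = 1 := by rw [← List.getD_eq_getElem?_getD]; exact h1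
      rcases hLz : Lz res i with _ | ⟨p, lz'⟩
      · -- no zero to the left: consume the first zero to the right, if any
        rcases hRz : Rz res i n with _ | ⟨r, rz'⟩
        · -- no zeros at all
          have hA : stepA res i = res := by
            rw [stepA, if_neg h1, findLeftZero_eq, hLz, findRightZero_eq, hlen, ← hshift, hRz]
            rfl
          rw [hA, stepB, Lz_succ_nonzero hz, hLz, ← hshift, hRz]
          simp [h1b]
        · have hrmem := mem_Rz (bs := res) (j := i) (n := n) (p := r) (by rw [hRz]; simp)
          have hr0 : res.getD r 0 = 0 := hrmem.2.2
          have hrn : r < n := hrmem.2.1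
          have hri : i < r := by
            rcases Nat.lt_or_ge i r with h | h
            · exact h
            · exfalso
              have : r = i := by omega
              exact hz (this ▸ hr0)
          have hA : stepA res i = (res.set r (res.getD i 0)).set i 0 := by
            rw [stepA, if_neg h1, findLeftZero_eq, hLz, findRightZero_eq, hlen, ← hshift, hRz]
            show (res.set r (res.getD i 0)).set i (res.getD r 0) = _
            rw [hr0]
          have hB : stepB (res, ([] : List Nat), r :: rz') i
              = ((res.set r (res[i]?.getD 0)).set i 0, [i], rz') := by
            rw [stepB]
            have hri' : ¬ (r :: rz').head? = some i := by simp; omega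
            rw [if_neg hri']
            simp [h1b]
          rw [hB, hA, (by rw [List.getD_eq_getElem?_getD] : res[i]?.getD 0 = res.getD i 0)]
          have hset : ∀ j, ((res.set r (res.getD i 0)).set i 0).getD j 0
              = if j = i then 0 else if j = r then res.getD i 0 else res.getD j 0 := by
            intro j
            rw [getD_set _ i j 0 (by rw [List.length_set]; omega),
                getD_set _ r j _ (by omega)]
          refine Prod.ext rfl (Prod.ext ?_ ?_) <;> simp only []
          · -- left stack becomes [i]
            have hfil : (List.range i).filter (fun j => res.getD j 0 = 0) = [] := by
              have h' := congrArg List.reverse hLz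
              rw [Lz] at h'
              simpa using h'
            rw [Lz, List.range_succ, List.filter_append]
            have hcongr : (List.range i).filter
                (fun j => ((res.set r (res.getD i 0)).set i 0).getD j 0 = 0)
                = (List.range i).filter (fun j => res.getD j 0 = 0) := by
              refine List.filter_congr (fun j hj => ?_)
              have hji : j < i := List.mem_range.mp hj
              rw [hset j, if_neg (by omega), if_neg (by omega)]
            rw [hcongr, hfil]
            have hii := hset i
            rw [if_pos rfl] at hii
            rw [List.filter_cons, hii]
            simp
          · -- right stack loses its top
            have hfil : (List.range' (i+1) (n - (i+1))).filter (fun j => res.getD j 0 = 0)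
                = [] ++ r :: rz' := by
              rw [← Rz, ← hshift, hRz]
              rfl
            rw [Rz]
            refine Eq.symm ((filter_remove List.nodup_range' ?_ ?_ hfil).trans (List.nil_append _))
            · intro j hj hjr
              obtain ⟨t, ht, he⟩ := List.mem_range'.mp hj
              have hji : i + 1 ≤ j := by omega
              rw [hset j, if_neg (by omega), if_neg hjr]
            · rw [hset r, if_neg (by omega), if_pos rfl]
              simp [hzb]
      · -- a zero to the left: consume the left-stack top
        have hpmem := mem_Lz (bs := res) (i := i) (p := p) (by rw [hLz]; simp)
        have hp0 : res.getD p 0 = 0 := hpmem.2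
        have hpi : p < i := hpmem.1
        have hA : stepA res i = (res.set p (res.getD i 0)).set i 0 := by
          rw [stepA, if_neg h1, findLeftZero_eq, hLz]
          show (res.set p (res.getD i 0)).set i (res.getD p 0) = _
          rw [hp0]
        have hB : stepB (res, p :: lz', Rz res i n) i
            = ((res.set p (res[i]?.getD 0)).set i 0, i :: lz', Rz res i n) := by
          rw [stepB, if_neg hne]
          simp [h1b]
        rw [hB, hA, (by rw [List.getD_eq_getElem?_getD] : res[i]?.getD 0 = res.getD i 0)]
        have hset : ∀ j, ((res.set p (res.getD i 0)).set i 0).getD j 0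
            = if j = i then 0 else if j = p then res.getD i 0 else res.getD j 0 := by
          intro j
          rw [getD_set _ i j 0 (by rw [List.length_set]; omega),
              getD_set _ p j _ (by omega)]
        refine Prod.ext rfl (Prod.ext ?_ ?_) <;> simp only []
        · -- left stack: p popped, i pushed
          have hfil : (List.range i).filter (fun j => res.getD j 0 = 0)
              = lz'.reverse ++ p :: [] := by
            have h' := congrArg List.reverse hLz
            rw [Lz] at h'
            simpa using h'
          have hfil' : (List.range i).filter
              (fun j => ((res.set p (res.getD i 0)).set i 0).getD j 0 = 0)
              = lz'.reverse ++ [] := by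
            refine filter_remove List.nodup_range ?_ ?_ hfil
            · intro j hj hjp
              have hji : j < i := List.mem_range.mp hj
              rw [hset j, if_neg (by omega), if_neg hjp]
            · rw [hset p, if_neg (by omega), if_pos rfl]
              simp [hzb]
          rw [Lz, List.range_succ, List.filter_append, hfil']
          have hii := hset i
          rw [if_pos rfl] at hii
          rw [List.filter_cons, hii]
          simp
        · -- right stack unchanged
          rw [hshift, Rz, Rz]
          refine List.filter_congr (fun j hj => ?_)
          obtain ⟨t, ht, he⟩ := List.mem_range'.mp hj
          have hji : i + 1 ≤ j := by omega
          rw [hset j, if_neg (by omega), if_neg (by omega)]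

theorem main_fold (cnt : Nat) : ∀ (i n : Nat) (res : List Int), res.length = n → i + cnt = n →
    (List.range' i cnt).foldl stepA res
      = ((List.range' i cnt).foldl stepB (res, Lz res i, Rz res i n)).1 := by
  induction cnt with
  | zero => intro i n res _ _; simp
  | succ c ih =>
    intro i n res hlen hcnt
    rw [List.range'_succ, List.foldl_cons, List.foldl_cons,
        step_eq res i n hlen (by omega)]
    exact ih (i+1) n (stepA res i) (by rw [stepA_length]; exact hlen) (by omega)

-- ===== VERDICT (by name: the statement is the Claim_ definition above) =====
theorem rearrangeLadybugs_spec : Claim_equal_rearrangeLadybugs := by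
  intro bs _
  unfold Spec_rearrangeLadybugs rearrangeLadybugs rearrangeLadybugs_alt
  have h := main_fold bs.length 0 bs.length bs rfl (by omega)
  have e1 : Lz bs 0 = [] := by simp [Lz]
  have e2 : Rz bs 0 bs.length = (List.range bs.length).filter (fun j => bs.getD j 0 = 0) := by
    rw [Rz, Nat.sub_zero, List.range_eq_range']
  rw [e1, e2, ← List.range_eq_range'] at h
  exact h
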